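-- pv_equiv track=rewrite | github.com/aycakk/cognitwin | src/pipeline/roadmap_planner.py | _group_by_package
-- ===== SOURCE A (Python) =====
-- def _group_by_package(
--     backlog: list[dict]
-- ) -> dict[str, list[dict]]:
--     """Group stories by deployment_package → epic → 'Core' fallback."""
--     groups: dict[str, list[dict]] = {}
--     for story in backlog:
--         if story.get("status") in ("accepted", "rejected"):
--             continue
--         key = (
--             story.get("deployment_package")
--             or story.get("epic")
--             or "Core"
--         )
--         groups.setdefault(key, []).append(story)
--     return groups
-- ===== SOURCE B (Python) =====
-- def _group_by_package(
--     backlog: list[dict]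
-- ) -> dict[str, list[dict]]:
--     """Group stories by deployment_package -> epic -> 'Core' fallback."""
--     def key(s):
--         return s.get("deployment_package") or s.get("epic") or "Core"
--     active = [s for s in backlog
--               if s.get("status") not in ("accepted", "rejected")]
--     keys = dict.fromkeys(key(s) for s in active)
--     return {k: [s for s in active if key(s) == k] for k in keys}
-- ===== Notes on version B (the rewrite author's own statement) =====
-- stated objective: alternative
-- what changed: A builds the dict incrementally with setdefault(...).append inside one loop; B first filters out accepted/rejected stories, dedups the key sequence in first-occurrence order with dict.fromkeys, then builds the result by one comprehension per key.
import Mathlib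
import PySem

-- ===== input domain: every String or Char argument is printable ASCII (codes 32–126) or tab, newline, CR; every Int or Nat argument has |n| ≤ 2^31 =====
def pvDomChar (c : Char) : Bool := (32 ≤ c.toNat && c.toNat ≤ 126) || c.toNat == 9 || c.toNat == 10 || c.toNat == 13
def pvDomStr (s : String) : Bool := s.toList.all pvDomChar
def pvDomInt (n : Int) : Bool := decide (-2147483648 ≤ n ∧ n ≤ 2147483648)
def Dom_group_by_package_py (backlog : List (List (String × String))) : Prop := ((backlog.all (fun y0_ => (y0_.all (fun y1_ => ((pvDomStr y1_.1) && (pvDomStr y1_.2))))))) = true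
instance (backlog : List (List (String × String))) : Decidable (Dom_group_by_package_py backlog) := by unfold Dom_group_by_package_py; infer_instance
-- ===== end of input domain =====

-- B replaces A's incremental setdefault/append loop by filter + ordered key dedup + one per-key pass; alternative decomposition, same results.

-- shared helpers: Python 'story.get(k)' (first match) and the 'or'-fallback key / status test
def pvGet (story : List (String × String)) (k : String) : Option String :=
  (PySem.Dict.mk story).get? k

-- Python 'x or y' on an optional string: falsy = None or ""
def pvOrStr (o : Option String) (fb : String) : String :=
  match o with
  | some v => if v = "" then fb else v
  | none => fb

def pvKey (story : List (String × String)) : String :=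
  pvOrStr (pvGet story "deployment_package") (pvOrStr (pvGet story "epic") "Core")

def pvSkip (story : List (String × String)) : Bool :=
  pvGet story "status" == some "accepted" || pvGet story "status" == some "rejected"

-- ===== PORT A =====
def group_by_package_py (backlog : List (List (String × String))) : List (String × List (List (String × String))) :=
  (backlog.foldl
    (fun (groups : PySem.Dict String (List (List (String × String)))) story =>
      if pvSkip story then groups
      else groups.modify (pvKey story) [] (· ++ [story]))
    PySem.Dict.empty).items

-- ===== PORT B =====
def group_by_package_py_alt (backlog : List (List (String × String))) : List (String × List (List (String × String))) :=
  let active := backlog.filter (fun s => !pvSkip s)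
  let keys := PySem.List.dedup (active.map pvKey)
  keys.map (fun k => (k, active.filter (fun s => pvKey s == k)))

-- ===== PRECONDITION & SPEC =====
def Spec_group_by_package_py (backlog : List (List (String × String))) (out : List (String × List (List (String × String)))) : Prop := out = group_by_package_py_alt backlog
instance (backlog : List (List (String × String))) (out : List (String × List (List (String × String)))) : Decidable (Spec_group_by_package_py backlog out) := by unfold Spec_group_by_package_py; infer_instance

-- ===== CLAIM (what is proved, stated in full; the proofs are below) =====
def Claim_equal_group_by_package_py : Prop := ∀ (backlog : List (List (String × String))), Dom_group_by_package_py backlog → Spec_group_by_package_py backlog (group_by_package_py backlog)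

-- ===== LEMMAS AND PROOFS =====

-- A's 'continue' on skipped stories is a fold over the filtered list
theorem foldl_if_skip {α β : Type} (p : α → Bool) (f : β → α → β) (l : List α) (init : β) :
    l.foldl (fun acc x => if p x then acc else f acc x) init
      = (l.filter (fun x => !p x)).foldl f init := by
  induction l generalizing init with
  | nil => rfl
  | cons x t ih =>
      by_cases h : p x = true <;> simp [h, List.foldl_cons, ih]

theorem group_by_package_py_spec : Claim_equal_group_by_package_py := by
  intro backlog _
  unfold Spec_group_by_package_py group_by_package_py group_by_package_py_alt
  rw [foldl_if_skip]
  set active := backlog.filter (fun s => !pvSkip s) with hactive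
  -- the grouping fold, reshaped over (key, story) pairs
  have hfold : active.foldl
      (fun (g : PySem.Dict String (List (List (String × String)))) story =>
        g.modify (pvKey story) [] (· ++ [story])) PySem.Dict.empty
      = (active.map (fun s => (pvKey s, s))).foldl
          (fun g p => g.modify p.1 [] (· ++ [p.2])) PySem.Dict.empty := by
    rw [List.foldl_map]
  rw [hfold]
  set l := active.map (fun s => (pvKey s, s)) with hl
  set d := l.foldl (fun (g : PySem.Dict String (List (List (String × String)))) p =>
      g.modify p.1 [] (· ++ [p.2])) PySem.Dict.empty with hd
  have hkeys : d.keys = PySem.List.dedup (active.map pvKey) := by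
    rw [hd, hl, PySem.Dict.keys_foldl_modify_key]
    simp only [PySem.Dict.keys_empty, List.map_map, Function.comp_def]
    exact PySem.Set.update_nil_left _
  have hnodup : d.keys.Nodup := by
    rw [hkeys]; exact PySem.List.nodup_dedup _
  rw [PySem.Dict.items_eq_map_keys d hnodup [], hkeys]
  refine List.map_congr_left (fun k hk => ?_)
  have hval : d.getD k [] = active.filter (fun s => pvKey s == k) := by
    rw [hd, PySem.Dict.getD_foldl_modify_append, PySem.Dict.getD_empty, hl]
    rw [List.filter_map, List.map_map]
    simp [Function.comp_def]
  rw [hval]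

-- ===== VERDICT (by name: the statement is the Claim_ definition above) =====
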